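-- pv_equiv track=rewrite | github.com/mandalbiswadip/codeforces | array_elimination.py | array_eliminations
-- ===== SOURCE A (Python) =====
-- def array_eliminations(arr, n):
--     bit_count = [0 for _ in range(30)]
--
--     num = 1
--
--
--     for i in range(30):
--
--         for elm in arr:
--             k = elm & num
--             if k != 0:
--                 bit_count[i] += 1
--         num *= 2
--     results = []
--     for k in range(1, n+1):
--
--         flag = True
--         for i in range(30):
--             if bit_count[i] % k != 0:
--                 flag = False
--                 break
--
--         if flag:
--             results.append(str(k))
--     return " ".join(results)
-- ===== SOURCE B (Python) =====
-- def array_eliminations(arr, n):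
--     def gcd(a, b):
--         while b:
--             a, b = b, a % b
--         return a
--
--     counts = [sum(1 for x in arr if x & (1 << i)) for i in range(30)]
--     g = 0
--     for c in counts:
--         g = gcd(g, c)
--     return " ".join(str(k) for k in range(1, n + 1) if g % k == 0)
-- ===== Notes on version B (the rewrite author's own statement) =====
-- stated objective: simpler
-- what changed: B replaces A's quadratic check (re-scanning all 30 bit counts for every k with an early-break flag loop, after an outer loop threading a doubling num through an in-place counter list) by a per-bit count comprehension, a single gcd g folded over the 30 counts, and a filter of 1..n by g % k == 0.
import Mathlib
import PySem

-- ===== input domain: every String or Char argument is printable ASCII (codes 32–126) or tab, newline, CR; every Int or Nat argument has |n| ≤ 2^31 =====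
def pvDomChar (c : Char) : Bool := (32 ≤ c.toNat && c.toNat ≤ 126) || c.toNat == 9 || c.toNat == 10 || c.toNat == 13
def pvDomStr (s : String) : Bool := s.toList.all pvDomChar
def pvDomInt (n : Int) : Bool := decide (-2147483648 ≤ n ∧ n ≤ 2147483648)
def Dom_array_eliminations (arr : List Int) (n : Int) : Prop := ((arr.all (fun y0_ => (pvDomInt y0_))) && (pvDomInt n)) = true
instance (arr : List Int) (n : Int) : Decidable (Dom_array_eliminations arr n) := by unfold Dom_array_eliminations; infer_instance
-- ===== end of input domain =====

-- B replaces A's per-k rescan of the 30 bit counts by one gcd of the counts and a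
-- divisibility filter of 1..n (objective: simpler).

-- ===== PORT A =====
-- inner 'for i in range(30): if bit_count[i] % k != 0: flag = False; break' loop:
-- bit_count always has length 30, so iterating the list is iterating its 30 indices.
def pvFlagLoop : List Int → Int → Bool
  | [], _ => true
  | c :: rest, k => if PySem.Int.mod c k != 0 then false else pvFlagLoop rest k

def array_eliminations (arr : List Int) (n : Int) : String :=
  -- bit_count = [0 for _ in range(30)]
  let s := (List.range 30).foldl
    (fun (s : List Int × Int) i =>
      (arr.foldl (fun bc elm =>
          if PySem.Int.band elm s.2 != 0 then bc.set i (bc.getD i 0 + 1) else bc) s.1,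
       s.2 * 2))
    (List.replicate 30 0, 1)
  let results := (PySem.List.pyRange 1 (n + 1) 1).foldl
    (fun res k => if pvFlagLoop s.1 k then res ++ [PySem.Int.toStr k] else res)
    ([] : List String)
  PySem.Str.join " " results

-- ===== PORT B =====
-- hand-written Euclid from Source B: while b: a, b = b, a % b
def pygcd (a b : Int) : Int :=
  if _h : b = 0 then a else pygcd b (PySem.Int.mod a b)
termination_by b.natAbs
decreasing_by
  rcases lt_or_gt_of_ne _h with hb | hb
  · have := PySem.Int.mod_neg_bounds a hb; omega
  · have h1 := PySem.Int.mod_nonneg a hb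
    have h2 := PySem.Int.mod_lt a hb
    omega

def array_eliminations_alt (arr : List Int) (n : Int) : String :=
  -- counts = [sum(1 for x in arr if x & (1 << i)) for i in range(30)]  (2^i = 1 << i)
  let counts : List Int :=
    (List.range 30).map (fun i => (arr.countP (fun x => PySem.Int.band x (2 ^ i) != 0) : Int))
  let g := counts.foldl (fun g c => pygcd g c) 0
  PySem.Str.join " "
    (((PySem.List.pyRange 1 (n + 1) 1).filter (fun k => PySem.Int.mod g k == 0)).map
      PySem.Int.toStr)

-- ===== PRECONDITION & SPEC =====
def Spec_array_eliminations (arr : List Int) (n : Int) (out : String) : Prop := out = array_eliminations_alt arr n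
instance (arr : List Int) (n : Int) (out : String) : Decidable (Spec_array_eliminations arr n out) := by unfold Spec_array_eliminations; infer_instance

-- ===== CLAIM (what is proved, stated in full; the proofs are below) =====
def Claim_equal_array_eliminations : Prop := ∀ (arr : List Int) (n : Int), Dom_array_eliminations arr n → Spec_array_eliminations arr n (array_eliminations arr n)

-- ===== LEMMAS AND PROOFS =====

lemma pv_getD_eq (l : List Int) (i : Nat) (h : i < l.length) : l.getD i 0 = l[i] := by
  simp [List.getD_eq_getElem?_getD, List.getElem?_eq_getElem h]

lemma pv_set_getD_self (l : List Int) (i : Nat) (h : i < l.length) :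
    l.set i (l.getD i 0) = l := by
  apply List.ext_getElem (by simp)
  intro j h1 h2
  by_cases hij : i = j
  · subst hij
    rw [List.getElem_set, if_pos rfl, pv_getD_eq l i h]
  · simp [hij]

lemma pv_inner_fold (p : Int → Bool) :
    ∀ (arr bc : List Int) (i : Nat), i < bc.length →
      arr.foldl (fun bc elm => if p elm then bc.set i (bc.getD i 0 + 1) else bc) bc
        = bc.set i (bc.getD i 0 + (arr.countP p : Int)) := by
  intro arr
  induction arr with
  | nil =>
    intro bc i h
    simpa using (pv_set_getD_self bc i h).symm
  | cons a t ih =>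
    intro bc i h
    simp only [List.foldl_cons, List.countP_cons]
    by_cases hp : p a
    · rw [if_pos hp, ih (bc.set i (bc.getD i 0 + 1)) i (by simpa using h)]
      have hg : (bc.set i (bc.getD i 0 + 1)).getD i 0 = bc.getD i 0 + 1 := by
        rw [pv_getD_eq _ i (by simpa using h)]
        simp
      rw [hg, List.set_set]
      congr 1
      simp [hp]
      ring
    · rw [if_neg hp, ih bc i h]
      congr 1
      simp [hp]

-- the count B computes for bit i
def pvCnt (arr : List Int) (i : Nat) : Int :=
  (arr.countP (fun x => PySem.Int.band x (2 ^ i) != 0) : Int)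

lemma pv_outer (arr : List Int) :
    ∀ m, m ≤ 30 →
      (List.range m).foldl
        (fun (s : List Int × Int) i =>
          (arr.foldl (fun bc elm =>
              if PySem.Int.band elm s.2 != 0 then bc.set i (bc.getD i 0 + 1) else bc) s.1,
           s.2 * 2))
        (List.replicate 30 0, 1)
      = ((List.range 30).map (fun i => if i < m then pvCnt arr i else 0), 2 ^ m) := by
  intro m
  induction m with
  | zero =>
    intro _
    simp [List.map_const']
  | succ m ih =>
    intro h
    rw [List.range_succ, List.foldl_append, ih (by omega)]
    simp only [List.foldl_cons, List.foldl_nil]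
    have hlen : m < ((List.range 30).map (fun i => if i < m then pvCnt arr i else 0)).length := by
      simp; omega
    rw [pv_inner_fold _ arr _ m hlen]
    have hg0 : ((List.range 30).map (fun i => if i < m then pvCnt arr i else 0)).getD m 0 = 0 := by
      rw [pv_getD_eq _ m hlen]
      simp
    rw [hg0]
    refine Prod.ext ?_ (by ring)
    apply List.ext_getElem (by simp)
    intro j h1 h2
    by_cases hj : m = j
    · subst hj
      simp [pvCnt]
    · simp only [List.getElem_set, List.getElem_map, List.getElem_range, if_neg hj]
      have : j < m ↔ j < m + 1 := by
        simp at h1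
        omega
      simp [this]

lemma pv_dvd_pygcd (k : Int) : ∀ (a b : Int), (k ∣ pygcd a b ↔ k ∣ a ∧ k ∣ b) := by
  intro a b
  induction a, b using pygcd.induct with
  | case1 a =>
    rw [pygcd]
    simp
  | case2 a b h ih =>
    rw [pygcd, dif_neg h, ih]
    have hab := PySem.Int.floordiv_mul_add_mod a b
    constructor
    · rintro ⟨hb, hm⟩
      exact ⟨hab ▸ dvd_add (hb.mul_left _) hm, hb⟩
    · rintro ⟨ha, hb⟩
      refine ⟨hb, ?_⟩
      have hm : PySem.Int.mod a b = a - PySem.Int.floordiv a b * b := by linarith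
      rw [hm]
      exact dvd_sub ha (hb.mul_left _)

lemma pv_dvd_foldl (k : Int) :
    ∀ (l : List Int) (a : Int),
      (k ∣ l.foldl (fun g c => pygcd g c) a ↔ k ∣ a ∧ ∀ c ∈ l, k ∣ c) := by
  intro l
  induction l with
  | nil => intro a; simp
  | cons c t ih =>
    intro a
    simp only [List.foldl_cons]
    rw [ih, pv_dvd_pygcd]
    simp only [List.mem_cons]
    constructor
    · rintro ⟨⟨ha, hc⟩, ht⟩
      exact ⟨ha, by rintro x (rfl | hx); exact hc; exact ht x hx⟩
    · rintro ⟨ha, hall⟩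
      exact ⟨⟨ha, hall c (Or.inl rfl)⟩, fun x hx => hall x (Or.inr hx)⟩

lemma pv_flagLoop_all (l : List Int) (k : Int) :
    pvFlagLoop l k = l.all (fun c => PySem.Int.mod c k == 0) := by
  induction l with
  | nil => rfl
  | cons c t ih =>
    cases h : (PySem.Int.mod c k == 0) <;> simp [pvFlagLoop, bne, h, ih]

lemma pv_flagLoop_eq (l : List Int) (k : Int) :
    pvFlagLoop l k = (PySem.Int.mod (l.foldl (fun g c => pygcd g c) 0) k == 0) := by
  rw [pv_flagLoop_all, Bool.eq_iff_iff]
  simp only [List.all_eq_true, beq_iff_eq, PySem.Int.mod_eq_zero_iff_dvd, pv_dvd_foldl]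
  simp

-- ===== VERDICT (by name: the statement is the Claim_ definition above) =====
theorem array_eliminations_spec : Claim_equal_array_eliminations := by
  intro arr n _
  unfold Spec_array_eliminations array_eliminations array_eliminations_alt
  rw [pv_outer arr 30 le_rfl]
  have hc : ((List.range 30).map (fun i => if i < 30 then pvCnt arr i else 0))
      = (List.range 30).map
          (fun i => (arr.countP (fun x => PySem.Int.band x (2 ^ i) != 0) : Int)) := by
    apply List.map_congr_left
    intro i hi
    simp [pvCnt, List.mem_range.mp hi]
  simp only [hc, pv_flagLoop_eq, PySem.List.foldl_append_if, List.nil_append]
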